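-- pv_equiv track=rewrite | github.com/leejuhanKr/Algorithm | 프로그래머스/unrated/148652. 유사 칸토어 비트열/유사 칸토어 비트열.py | foo
-- ===== SOURCE A (Python) =====
-- def foo(n,l,r):
--     if n == 0:
--         return '1'
--     ql, rl = divmod(l,5)
--     qr, rr = divmod(r,5)
--
--     prev = foo(n-1, ql, qr+1)
--     res = ''
--     for char in prev:
--         if char == '1':
--             res += '11011'
--         else:
--             res += '00000'
--     return res[rl: rl+r-l]
-- ===== SOURCE B (Python) =====
-- def foo(n, l, r):
--     def bit(p):
--         for _ in range(n):
--             if p == 0: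
--                 break
--             p, d = divmod(p, 5)
--             if d == 2:
--                 return '0'
--         return '1'
--     return ''.join(bit(p) for p in range(l, r))
-- ===== Notes on version B (the rewrite author's own statement) =====
-- stated objective: simpler
-- what changed: Replaces A's bottom-up recursion that expands the whole level-(n-1) string block-by-block and slices it with an independent per-position closed-form test: bit p is '1' iff none of p's base-5 digits equals 2, joined over range(l, r); Pre_foo excludes the inputs where A raises RecursionError (n < 0, and n past the interpreter's recursion budget) and the reversed/out-of-block ranges where A's value is an accident of Python's negative-slice wraparound or silent slice truncation.
-- intended difference: On n = 0 with an empty or reversed range r <= l, A returns '1' although the requested slice bits[l:r] is empty; B returns the intended ''. — e.g. on foo(0, 0, 0): A returns "1", B returns ""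
-- outside the precondition, e.g. on foo(2147483648, 0, 1): A raises RecursionError, B returns '1'; on foo(1, 5, 1): A returns '1', B returns ''; on foo(1, 0, 6): A returns '11011', B returns '110111'
import Mathlib
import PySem

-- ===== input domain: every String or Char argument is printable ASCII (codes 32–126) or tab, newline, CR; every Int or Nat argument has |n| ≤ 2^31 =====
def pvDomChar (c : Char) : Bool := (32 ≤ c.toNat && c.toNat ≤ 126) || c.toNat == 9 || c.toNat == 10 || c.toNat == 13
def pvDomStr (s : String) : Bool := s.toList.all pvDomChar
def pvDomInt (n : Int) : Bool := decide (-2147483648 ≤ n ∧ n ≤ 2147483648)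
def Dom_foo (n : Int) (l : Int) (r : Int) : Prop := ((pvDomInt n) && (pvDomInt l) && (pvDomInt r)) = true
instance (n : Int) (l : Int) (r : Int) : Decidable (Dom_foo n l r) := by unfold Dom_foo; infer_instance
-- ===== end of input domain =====

-- B replaces A's bottom-up recursive string expansion by an independent per-position
-- base-5 digit test (bit p = '1' iff no base-5 digit of p equals 2); objective: simpler.


-- ===== PORT A =====
-- A's recursion is on n (Python: 'if n == 0 … else … foo(n-1, …)'); we recurse on the
-- fuel n.toNat (identical for the n ≥ 0 admitted by Pre_foo; for n < 0 Python's
-- recursion never comes back — RecursionError — which Pre_foo excludes).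
def fooChars : Nat → Int → Int → List Char
  | 0, _, _ => ['1']                                   -- if n == 0: return '1'
  | Nat.succ m, l, r =>
      let ql := PySem.Int.floordiv l 5                 -- ql, rl = divmod(l, 5)
      let rl := PySem.Int.mod l 5
      let _qr := PySem.Int.floordiv r 5                -- qr, rr = divmod(r, 5)
      let _rr := PySem.Int.mod r 5
      let prev := fooChars m ql (_qr + 1)              -- prev = foo(n-1, ql, qr+1)
      let res := prev.foldl                            -- for char in prev: res += …
        (fun acc c => acc ++ (if c = '1' then ['1','1','0','1','1'] else ['0','0','0','0','0'])) []
      PySem.List.slice res (some rl) (some (rl + r - l))   -- return res[rl : rl+r-l]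

def foo (n : Int) (l : Int) (r : Int) : String := String.ofList (fooChars n.toNat l r)

-- ===== PORT B =====
-- bit(p): up to n times divide p by 5; '0' as soon as a remainder is 2, '1' otherwise
-- (breaking early once p == 0, all remaining digits being 0).
def bitChar : Nat → Int → Char
  | 0, _ => '1'
  | Nat.succ m, p =>
      if p = 0 then '1'
      else
        let q := PySem.Int.floordiv p 5
        let d := PySem.Int.mod p 5
        if d = 2 then '0' else bitChar m q

def foo_alt (n : Int) (l : Int) (r : Int) : String :=
  String.ofList ((PySem.List.pyRange l r 1).map (fun p => bitChar n.toNat p))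

-- ===== PRECONDITION & SPEC =====
-- pvChainR r d is a closed form for the right endpoint A's recursion passes at depth d
-- (the d-fold iterate of r ↦ r//5 + 1, solved: r_d = 1 + (r - 1 + (5^d-1)/4) // 5^d);
-- the left endpoint at depth d is simply l // 5^d.
def pvChainR (r : Int) (d : Nat) : Int :=
  1 + PySem.Int.floordiv (r - 1 + ((5 : Int) ^ d - 1) / 4) ((5 : Int) ^ d)

-- Pre_foo requires 0 ≤ n ≤ 9000 because outside that band A CRASHES: for n < 0 its
-- recursion has no base case, and its recursion is n+1 frames deep, so past the
-- interpreter's recursion budget it overflows the stack — RecursionError either way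
-- (e.g. A raises RecursionError at (-1, 0, 1) and at (2**31, 0, 1), where B returns '1'). Within it, Pre_foo admits (a) forward ranges
-- l ≤ r lying inside the 5^n-block of positions that contains l, i.e.
-- r ≤ 5^n*(l//5^n + 1) (this contains the problem's contract domain 0 ≤ l ≤ r ≤ 5^n;
-- past that block end A silently truncates its result, an artefact of slicing the
-- shorter recursive string — excluded, see claim.json cites); (b) empty and reversed
-- ranges: all of them for n = 0, and for n ≥ 1 those where at some depth d < n the
-- recursion's interval (l//5^d, pvChainR r d) is reversed with a gap ≥ 5^(n-d) + 4 or
-- empty-in-place (gap between 0 and l//5^d mod 5) — there A returns ''; on the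
-- remaining reversed ranges A's occasionally nonempty result is an accident of Python's
-- negative slice-index wraparound in res[rl : rl+r-l] (excluded, see claim.json cites).
def Pre_foo (n : Int) (l : Int) (r : Int) : Prop :=
  0 ≤ n ∧ n ≤ 9000 ∧
    ((n = 0 ∧ r ≤ l) ∨
     (1 ≤ n ∧ ∃ d ∈ Finset.range n.toNat,
        ((5 : Int) ^ (n.toNat - d) + 4 ≤ PySem.Int.floordiv l ((5 : Int) ^ d) - pvChainR r d ∨
         (0 ≤ PySem.Int.floordiv l ((5 : Int) ^ d) - pvChainR r d ∧
          PySem.Int.floordiv l ((5 : Int) ^ d) - pvChainR r d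
            ≤ PySem.Int.mod (PySem.Int.floordiv l ((5 : Int) ^ d)) 5))) ∨
     (l ≤ r ∧ r ≤ (5 : Int) ^ n.toNat * (PySem.Int.floordiv l ((5 : Int) ^ n.toNat) + 1)))
instance (n : Int) (l : Int) (r : Int) : Decidable (Pre_foo n l r) := by
  unfold Pre_foo; infer_instance
def pvWitness_foo : Int × Int × Int := (2, 3, 20)

-- On n = 0 with an empty or reversed range r ≤ l, A returns '1' although the requested
-- slice bits[l:r] is empty, so B returns the intended '' there.
def D_foo (n : Int) (l : Int) (r : Int) : Prop := n = 0 ∧ r ≤ l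
instance (n : Int) (l : Int) (r : Int) : Decidable (D_foo n l r) := by
  unfold D_foo; infer_instance

def Spec_foo (n : Int) (l : Int) (r : Int) (out : String) : Prop :=
  ¬ D_foo n l r → out = foo_alt n l r
instance (n : Int) (l : Int) (r : Int) (out : String) : Decidable (Spec_foo n l r out) := by
  unfold Spec_foo; infer_instance

def pvDiffWitness_foo : Int × Int × Int := (0, 0, 0)
def pvDiffWitnessOut_foo : String × String := ("1", "")

-- ===== CLAIM (what is proved, stated in full; the proofs are below) =====
def Claim_unchanged_foo : Prop := ∀ (n : Int) (l : Int) (r : Int), Dom_foo n l r → Pre_foo n l r → Spec_foo n l r (foo n l r)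
def Claim_changed_foo : Prop := Dom_foo (pvDiffWitness_foo.1) (pvDiffWitness_foo.2.1) (pvDiffWitness_foo.2.2) ∧ Pre_foo (pvDiffWitness_foo.1) (pvDiffWitness_foo.2.1) (pvDiffWitness_foo.2.2) ∧ D_foo (pvDiffWitness_foo.1) (pvDiffWitness_foo.2.1) (pvDiffWitness_foo.2.2) ∧ foo (pvDiffWitness_foo.1) (pvDiffWitness_foo.2.1) (pvDiffWitness_foo.2.2) = pvDiffWitnessOut_foo.1 ∧ foo_alt (pvDiffWitness_foo.1) (pvDiffWitness_foo.2.1) (pvDiffWitness_foo.2.2) = pvDiffWitnessOut_foo.2 ∧ pvDiffWitnessOut_foo.1 ≠ pvDiffWitnessOut_foo.2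
def Claim_exact_foo : Prop := ∀ (n : Int) (l : Int) (r : Int), Dom_foo n l r → Pre_foo n l r → D_foo n l r → foo n l r ≠ foo_alt n l r

-- ===== LEMMAS AND PROOFS =====

theorem bitChar_zero (k : Nat) : bitChar k 0 = '1' := by
  cases k <;> rfl

theorem bitChar_01 (k : Nat) (p : Int) : bitChar k p = '0' ∨ bitChar k p = '1' := by
  induction k generalizing p with
  | zero => right; rfl
  | succ m ih =>
    show (if p = 0 then '1' else _) = '0' ∨ (if p = 0 then '1' else _) = '1'
    split_ifs with h0
    · right; rfl
    · show (if PySem.Int.mod p 5 = 2 then '0' else bitChar m (PySem.Int.floordiv p 5)) = '0'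
        ∨ (if PySem.Int.mod p 5 = 2 then '0' else bitChar m (PySem.Int.floordiv p 5)) = '1'
      split_ifs with h2
      · left; rfl
      · exact ih _

theorem bitChar_succ_digit (k : Nat) (q d : Int) (hd0 : 0 ≤ d) (hd5 : d < 5) :
    bitChar (k + 1) (5 * q + d) = (if d = 2 then '0' else bitChar k q) := by
  by_cases h0 : 5 * q + d = 0
  · have hq0 : q = 0 := by omega
    have hd0' : d = 0 := by omega
    subst hq0; subst hd0'
    simp [bitChar, bitChar_zero]
  · have hdiv : PySem.Int.floordiv (5 * q + d) 5 = q :=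
      (PySem.Int.floordiv_eq_iff_of_pos (by norm_num)).mpr ⟨by omega, by omega⟩
    have hmod : PySem.Int.mod (5 * q + d) 5 = d := by
      have := PySem.Int.floordiv_mul_add_mod (5 * q + d) 5
      rw [hdiv] at this; omega
    show (if 5 * q + d = 0 then '1' else _) = _
    rw [if_neg h0]
    show (if PySem.Int.mod (5 * q + d) 5 = 2 then '0'
          else bitChar k (PySem.Int.floordiv (5 * q + d) 5)) = _
    rw [hdiv, hmod]

-- one expansion block of A = five consecutive bits of level k+1
theorem block_eq (k : Nat) (q : Int) :
    (if bitChar k q = '1' then ['1','1','0','1','1'] else ['0','0','0','0','0'])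
      = (PySem.List.pyRange (5 * q) (5 * q + 5) 1).map (bitChar (k + 1)) := by
  have e : PySem.List.pyRange (5 * q) (5 * q + 5) 1
      = [5 * q, 5 * q + 1, 5 * q + 2, 5 * q + 3, 5 * q + 4] := by
    rw [PySem.List.pyRange_one_cons (by omega), PySem.List.pyRange_one_cons (by omega),
        PySem.List.pyRange_one_cons (by omega), PySem.List.pyRange_one_cons (by omega),
        PySem.List.pyRange_one_cons (by omega), PySem.List.pyRange_one_eq_nil (by omega)]
    norm_num
    omega
  rw [e]
  have b0 := bitChar_succ_digit k q 0 (by norm_num) (by norm_num)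
  have b1 := bitChar_succ_digit k q 1 (by norm_num) (by norm_num)
  have b2 := bitChar_succ_digit k q 2 (by norm_num) (by norm_num)
  have b3 := bitChar_succ_digit k q 3 (by norm_num) (by norm_num)
  have b4 := bitChar_succ_digit k q 4 (by norm_num) (by norm_num)
  norm_num at b0 b1 b2 b3 b4
  simp only [List.map_cons, List.map_nil, b0, b1, b2, b3, b4]
  rcases bitChar_01 k q with h | h <;> simp [h]

-- expanding all blocks of [a, a+j) gives the bits of [5a, 5(a+j))
theorem blocks_eq (k : Nat) (j : Nat) : ∀ a : Int,
    (PySem.List.pyRange a (a + j) 1).flatMap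
        (fun q => if bitChar k q = '1' then ['1','1','0','1','1'] else ['0','0','0','0','0'])
      = (PySem.List.pyRange (5 * a) (5 * (a + j)) 1).map (bitChar (k + 1)) := by
  induction j with
  | zero =>
    intro a
    rw [PySem.List.pyRange_one_eq_nil (by omega), PySem.List.pyRange_one_eq_nil (by omega)]
    simp
  | succ j ih =>
    intro a
    rw [PySem.List.pyRange_one_cons (by push_cast; omega)]
    have hb : a + ((j : Int) + 1) = (a + 1) + (j : Int) := by ring
    push_cast
    rw [hb, List.flatMap_cons, ih (a + 1), block_eq k a,
        PySem.List.pyRange_one_append (5 * a) (5 * a + 5) (5 * (a + 1 + (j : Int)))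
          (by omega) (by omega)]
    have h5 : 5 * (a + 1) = 5 * a + 5 := by ring
    rw [List.map_append, h5]

theorem drop_map_pyRange {α : Type} (f : Int → α) (k : Nat) : ∀ a b : Int,
    (((PySem.List.pyRange a b 1).map f).drop k) = (PySem.List.pyRange (a + k) b 1).map f := by
  induction k with
  | zero => intro a b; simp
  | succ k ih =>
    intro a b
    by_cases h : a < b
    · rw [PySem.List.pyRange_one_cons h, List.map_cons, List.drop_succ_cons, ih (a + 1) b]
      have hb : (a + 1) + (k : Int) = a + ((k : Nat) + 1 : Nat) := by push_cast; ring
      rw [hb]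
    · rw [PySem.List.pyRange_one_eq_nil (le_of_not_gt h)]
      rw [PySem.List.pyRange_one_eq_nil (by omega)]
      simp

theorem take_map_pyRange {α : Type} (f : Int → α) (k : Nat) : ∀ a b : Int,
    (((PySem.List.pyRange a b 1).map f).take k) = (PySem.List.pyRange a (min b (a + k)) 1).map f := by
  induction k with
  | zero =>
    intro a b
    simp only [List.take_zero]
    rw [PySem.List.pyRange_one_eq_nil (by omega)]
    simp
  | succ k ih =>
    intro a b
    by_cases h : a < b
    · rw [PySem.List.pyRange_one_cons h, List.map_cons, List.take_succ_cons, ih (a + 1) b]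
      have hb : min b ((a + 1) + (k : Int)) = min b (a + ((k : Nat) + 1 : Nat)) := by
        push_cast; omega
      rw [hb]
      rw [← List.map_cons, ← PySem.List.pyRange_one_cons (by push_cast; omega)]
    · rw [PySem.List.pyRange_one_eq_nil (le_of_not_gt h)]
      rw [PySem.List.pyRange_one_eq_nil (by omega)]
      simp

-- the main invariant: on l < r ≤ cap + 1 (cap = the end 5^k*(l//5^k + 1) of the
-- 5^k-block of positions containing l), A's level-k string is the per-position digit
-- test over [l, min r cap)
theorem fooChars_eq (k : Nat) : ∀ l r : Int, l < r →
    r ≤ (5 : Int) ^ k * (PySem.Int.floordiv l ((5 : Int) ^ k) + 1) + 1 →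
    fooChars k l r
      = (PySem.List.pyRange l
          (min r ((5 : Int) ^ k * (PySem.Int.floordiv l ((5 : Int) ^ k) + 1))) 1).map
          (bitChar k) := by
  induction k with
  | zero =>
    intro l r hlr hr
    have hfl : PySem.Int.floordiv l ((5 : Int) ^ 0) = l := by
      rw [pow_zero]
      exact (PySem.Int.floordiv_eq_iff_of_pos (by norm_num)).mpr ⟨by omega, by omega⟩
    rw [hfl, pow_zero] at hr ⊢
    have hmin : min r (1 * (l + 1)) = l + 1 := by omega
    rw [hmin]
    show ['1'] = (PySem.List.pyRange l (l + 1) 1).map (bitChar 0)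
    rw [PySem.List.pyRange_one_singleton]
    rfl
  | succ k ih =>
    intro l r hlr hr
    have h5pos : (0 : Int) < (5 : Int) ^ k := by positivity
    -- the divmod facts
    have hl_eq : PySem.Int.floordiv l 5 * 5 + PySem.Int.mod l 5 = l :=
      PySem.Int.floordiv_mul_add_mod l 5
    have hrl0 : 0 ≤ PySem.Int.mod l 5 := PySem.Int.mod_nonneg l (by norm_num)
    have hrl5 : PySem.Int.mod l 5 < 5 := PySem.Int.mod_lt l (by norm_num)
    have hr_eq : PySem.Int.floordiv r 5 * 5 + PySem.Int.mod r 5 = r :=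
      PySem.Int.floordiv_mul_add_mod r 5
    have hrr0 : 0 ≤ PySem.Int.mod r 5 := PySem.Int.mod_nonneg r (by norm_num)
    have hrr5 : PySem.Int.mod r 5 < 5 := PySem.Int.mod_lt r (by norm_num)
    set ql := PySem.Int.floordiv l 5 with hql
    set rl := PySem.Int.mod l 5 with hrl
    set qr := PySem.Int.floordiv r 5 with hqr
    -- the block index of l is the same one level down (floor-division composes)
    have hC : PySem.Int.floordiv ql ((5 : Int) ^ k) = PySem.Int.floordiv l ((5 : Int) ^ (k + 1)) := by
      rw [hql, PySem.Int.floordiv_eq_ediv_of_pos (by norm_num : (0:Int) < 5),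
          PySem.Int.floordiv_eq_ediv_of_pos h5pos,
          PySem.Int.floordiv_eq_ediv_of_pos (by positivity), Int.ediv_ediv_of_nonneg, pow_succ]
      · ring_nf
      · norm_num
    set C := PySem.Int.floordiv l ((5 : Int) ^ (k + 1)) with hCdef
    set M := (5 : Int) ^ k * (C + 1) with hM
    have h5M : 5 * M = (5 : Int) ^ (k + 1) * (C + 1) := by rw [hM]; ring
    -- bracket for ql within its 5^k-block
    have hqlbr : C * (5 : Int) ^ k ≤ ql ∧ ql < (C + 1) * (5 : Int) ^ k := by
      have := (PySem.Int.floordiv_eq_iff_of_pos h5pos).mp hC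
      exact this
    have hqlM : ql < M := by rw [hM]; nlinarith [hqlbr.2]
    -- bounds for the recursive call
    have hqlqr : ql < qr + 1 := by omega
    have hqrM : qr + 1 ≤ M + 1 := by
      by_contra hcon
      have h2 : M + 1 ≤ qr := by omega
      have : (M + 1) * 5 ≤ r := by
        calc (M + 1) * 5 = qr * 5 - (qr - M - 1) * 5 := by ring
        _ ≤ r := by omega
      omega
    have hprev := ih ql (qr + 1) hqlqr (by rw [hC]; omega)
    rw [hC] at hprev
    -- unfold one step of A
    show PySem.List.slice
        ((fooChars k ql (qr + 1)).foldl
          (fun acc c => acc ++ (if c = '1' then ['1','1','0','1','1'] else ['0','0','0','0','0'])) [])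
        (some rl) (some (rl + r - l)) = _
    rw [hprev, PySem.List.foldl_append_eq_flatMap, List.nil_append, List.flatMap_map]
    -- the expanded string is the bits of [5·ql, 5·m)
    set m := min (qr + 1) M with hm
    have hm_ql : ql < m := by omega
    have hj : m = ql + ((m - ql).toNat : Int) := by omega
    rw [hj, blocks_eq k (m - ql).toNat ql, ← hj]
    -- slice = drop + take
    have hslice : PySem.List.slice ((PySem.List.pyRange (5 * ql) (5 * m) 1).map (bitChar (k + 1)))
        (some rl) (some (rl + r - l))
        = (((PySem.List.pyRange (5 * ql) (5 * m) 1).map (bitChar (k + 1))).drop rl.toNat).take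
            ((rl + r - l).toNat - rl.toNat) :=
      PySem.List.slice_toNat _ (by omega) (by omega)
    rw [hslice, drop_map_pyRange, take_map_pyRange]
    have e1 : 5 * ql + (rl.toNat : Int) = l := by omega
    have e2 : min (5 * m) (l + (((rl + r - l).toNat - rl.toNat : Nat) : Int))
        = min r ((5 : Int) ^ (k + 1) * (C + 1)) := by
      have h1 : (((rl + r - l).toNat - rl.toNat : Nat) : Int) = r - l := by omega
      rw [h1, ← h5M]
      omega
    rw [e1, e2]

-- small arithmetic toolbox for the depth-d chain
theorem fd_one (x : Int) : PySem.Int.floordiv x 1 = x :=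
  (PySem.Int.floordiv_eq_iff_of_pos (by norm_num)).mpr ⟨by omega, by omega⟩

theorem fd_mono (a b : Int) (h : a ≤ b) : PySem.Int.floordiv a 5 ≤ PySem.Int.floordiv b 5 := by
  rw [PySem.Int.le_floordiv_iff_mul_le (by norm_num)]
  have h1 := PySem.Int.floordiv_mul_add_mod a 5
  have h2 := PySem.Int.mod_nonneg a (b := 5) (by norm_num)
  omega

theorem fd_comp (x : Int) (d : Nat) :
    PySem.Int.floordiv (PySem.Int.floordiv x 5) ((5 : Int) ^ d) = PySem.Int.floordiv x ((5 : Int) ^ (d + 1)) := by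
  have h5 : (0 : Int) < 5 := by norm_num
  have hp : (0 : Int) < (5 : Int) ^ d := by positivity
  rw [PySem.Int.floordiv_eq_ediv_of_pos h5, PySem.Int.floordiv_eq_ediv_of_pos hp,
      PySem.Int.floordiv_eq_ediv_of_pos (by positivity), Int.ediv_ediv_of_nonneg, pow_succ]
  · ring_nf
  · norm_num

theorem fd_comp' (x : Int) (d : Nat) :
    PySem.Int.floordiv (PySem.Int.floordiv x ((5 : Int) ^ d)) 5 = PySem.Int.floordiv x ((5 : Int) ^ (d + 1)) := by
  have h5 : (0 : Int) < 5 := by norm_num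
  have hp : (0 : Int) < (5 : Int) ^ d := by positivity
  rw [PySem.Int.floordiv_eq_ediv_of_pos h5, PySem.Int.floordiv_eq_ediv_of_pos hp,
      PySem.Int.floordiv_eq_ediv_of_pos (by positivity), Int.ediv_ediv_of_nonneg, pow_succ]
  · exact le_of_lt hp

theorem fd_add_mul (x c b : Int) (hb : 0 < b) :
    PySem.Int.floordiv (x + c * b) b = PySem.Int.floordiv x b + c := by
  rw [PySem.Int.floordiv_eq_ediv_of_pos hb, PySem.Int.floordiv_eq_ediv_of_pos hb,
      Int.add_mul_ediv_right _ _ (by omega)]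

theorem four_dvd_pow_sub_one (d : Nat) : (4 : Int) ∣ (5 : Int) ^ d - 1 := by
  induction d with
  | zero => norm_num
  | succ d ih =>
    obtain ⟨e, he⟩ := ih
    exact ⟨5 * e + 1, by rw [pow_succ]; linarith⟩

theorem chainR_zero (r : Int) : pvChainR r 0 = r := by
  unfold pvChainR
  norm_num [fd_one]

theorem chainR_succ (r : Int) (d : Nat) :
    pvChainR r (d + 1) = pvChainR (PySem.Int.floordiv r 5 + 1) d := by
  obtain ⟨e, he⟩ := four_dvd_pow_sub_one d
  have hC0 : ((5 : Int) ^ d - 1) / 4 = e := by rw [he]; exact Int.mul_ediv_cancel_left e (by norm_num)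
  have hC1 : ((5 : Int) ^ (d + 1) - 1) / 4 = 5 * e + 1 := by
    have : (5 : Int) ^ (d + 1) - 1 = 4 * (5 * e + 1) := by rw [pow_succ]; linarith
    rw [this]; exact Int.mul_ediv_cancel_left _ (by norm_num)
  unfold pvChainR
  rw [hC0, hC1]
  have h1 : PySem.Int.floordiv r 5 + 1 - 1 + e = PySem.Int.floordiv (r + e * 5) 5 := by
    rw [fd_add_mul r e 5 (by norm_num)]; ring
  rw [h1, fd_comp]
  have h2 : r + e * 5 = r - 1 + (5 * e + 1) := by ring
  rw [h2]

theorem chainR_succ' (r : Int) (d : Nat) :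
    pvChainR r (d + 1) = PySem.Int.floordiv (pvChainR r d) 5 + 1 := by
  obtain ⟨e, he⟩ := four_dvd_pow_sub_one d
  have hC0 : ((5 : Int) ^ d - 1) / 4 = e := by rw [he]; exact Int.mul_ediv_cancel_left e (by norm_num)
  have hC1 : ((5 : Int) ^ (d + 1) - 1) / 4 = 5 * e + 1 := by
    have : (5 : Int) ^ (d + 1) - 1 = 4 * (5 * e + 1) := by rw [pow_succ]; linarith
    rw [this]; exact Int.mul_ediv_cancel_left _ (by norm_num)
  unfold pvChainR
  rw [hC0, hC1]
  have h2 : r - 1 + (5 * e + 1) = (r - 1 + e) + 1 * (5 : Int) ^ d := by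
    have : (5 : Int) ^ d = 4 * e + 1 := by omega
    rw [this]; ring
  rw [h2, ← fd_comp', fd_add_mul _ 1 _ (by positivity)]
  have h3 : PySem.Int.floordiv (r - 1 + e) ((5 : Int) ^ d) + 1
      = 1 + PySem.Int.floordiv (r - 1 + e) ((5 : Int) ^ d) := by ring
  rw [h3]
  ring

-- if l < r the depth-d interval is still forward (left endpoint strictly below pvChainR)
theorem chain_lt (l r : Int) (h : l < r) :
    ∀ d : Nat, PySem.Int.floordiv l ((5 : Int) ^ d) < pvChainR r d := by
  intro d
  induction d with
  | zero => rw [chainR_zero, pow_zero, fd_one]; exact h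
  | succ d ih =>
    rw [chainR_succ', ← fd_comp']
    have := fd_mono (PySem.Int.floordiv l ((5 : Int) ^ d)) (pvChainR r d) (by omega)
    omega

-- A returns '' when the current range is empty in place: 0 ≤ l - r ≤ l % 5
theorem fooChars_empty (k : Nat) (l r : Int) (h0 : 0 ≤ l - r)
    (h1 : l - r ≤ PySem.Int.mod l 5) : fooChars (k + 1) l r = [] := by
  show PySem.List.slice _ (some (PySem.Int.mod l 5)) (some (PySem.Int.mod l 5 + r - l)) = []
  have hm : 0 ≤ PySem.Int.mod l 5 := PySem.Int.mod_nonneg l (by norm_num)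
  rw [PySem.List.slice_toNat _ hm (by omega)]
  have ht : (PySem.Int.mod l 5 + r - l).toNat - (PySem.Int.mod l 5).toNat = 0 := by omega
  rw [ht]
  simp

-- emptiness propagates up A's recursion
theorem fooChars_inner_nil (k : Nat) (l r : Int)
    (h : fooChars k (PySem.Int.floordiv l 5) (PySem.Int.floordiv r 5 + 1) = []) :
    fooChars (k + 1) l r = [] := by
  show PySem.List.slice
      ((fooChars k (PySem.Int.floordiv l 5) (PySem.Int.floordiv r 5 + 1)).foldl
        (fun acc c => acc ++ (if c = '1' then ['1','1','0','1','1'] else ['0','0','0','0','0'])) [])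
      (some (PySem.Int.mod l 5)) (some (PySem.Int.mod l 5 + r - l)) = []
  rw [h]
  have h0 : (PySem.List.slice ([] : List Char) (some (PySem.Int.mod l 5))
      (some (PySem.Int.mod l 5 + r - l))).length = 0 := by
    rw [PySem.List.length_slice]
    have h1 := PySem.List.clampIdx_le (n := ([] : List Char).length) (i := PySem.Int.mod l 5 + r - l)
    have h2 := PySem.List.clampIdx_le (n := ([] : List Char).length) (i := PySem.Int.mod l 5)
    simp only [List.length_nil] at h1 h2 ⊢
    omega
  exact List.eq_nil_of_length_eq_zero h0

-- A's strings never exceed 5^k characters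
theorem fooChars_length_le (k : Nat) : ∀ l r : Int, (fooChars k l r).length ≤ 5 ^ k := by
  induction k with
  | zero => intro l r; simp [fooChars]
  | succ k ih =>
    intro l r
    simp only [fooChars]
    rw [PySem.List.foldl_append_eq_flatMap, List.nil_append, PySem.List.length_slice,
        List.length_flatMap,
        List.map_congr_left (g := fun _ => 5) (fun c _ => by split_ifs <;> rfl)]
    have hsum : ((fooChars k (PySem.Int.floordiv l 5) (PySem.Int.floordiv r 5 + 1)).map
        (fun _ => (5 : Nat))).sum
        = 5 * (fooChars k (PySem.Int.floordiv l 5) (PySem.Int.floordiv r 5 + 1)).length := by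
      simp [List.map_const', List.sum_replicate, mul_comm]
    have hb := PySem.List.clampIdx_le
        (n := ((fooChars k (PySem.Int.floordiv l 5) (PySem.Int.floordiv r 5 + 1)).map
          (fun _ => (5 : Nat))).sum)
        (i := PySem.Int.mod l 5 + r - l)
    have hk := ih (PySem.Int.floordiv l 5) (PySem.Int.floordiv r 5 + 1)
    have h5 : (5 : Nat) ^ (k + 1) = 5 * 5 ^ k := by ring
    omega

-- on a reversed range with gap at least 5^(k+1) + 4, A returns the empty string
theorem fooChars_rev (k : Nat) (l r : Int) (h : (5 : Int) ^ (k + 1) + 4 ≤ l - r) :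
    fooChars (k + 1) l r = [] := by
  simp only [fooChars]
  rw [PySem.List.foldl_append_eq_flatMap, List.nil_append]
  have hrl0 : 0 ≤ PySem.Int.mod l 5 := PySem.Int.mod_nonneg l (by norm_num)
  have hrl5 : PySem.Int.mod l 5 < 5 := PySem.Int.mod_lt l (by norm_num)
  set res := (fooChars k (PySem.Int.floordiv l 5) (PySem.Int.floordiv r 5 + 1)).flatMap
      (fun c => if c = '1' then ['1','1','0','1','1'] else ['0','0','0','0','0'])
    with hres
  have hprev := fooChars_length_le k (PySem.Int.floordiv l 5) (PySem.Int.floordiv r 5 + 1)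
  have hlen : res.length = 5 * (fooChars k (PySem.Int.floordiv l 5)
      (PySem.Int.floordiv r 5 + 1)).length := by
    rw [hres, List.length_flatMap,
        List.map_congr_left (g := fun _ => 5) (fun c _ => by split_ifs <;> rfl)]
    simp [List.map_const', List.sum_replicate, mul_comm]
  have hpow1 : (1 : Nat) ≤ 5 ^ k := Nat.one_le_pow _ _ (by norm_num)
  have hcast : ((5 ^ (k + 1) : Nat) : Int) = (5 : Int) ^ (k + 1) := by push_cast; ring
  have h5N : (5 : Nat) ^ (k + 1) = 5 * 5 ^ k := by ring
  have h5I : (5 : Int) ^ (k + 1) = 5 * (5 : Int) ^ k := by ring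
  set s : Nat := (l - r - PySem.Int.mod l 5).toNat with hs
  have hs0 : 0 < s := by omega
  have hsl : res.length ≤ s := by omega
  have hstop : PySem.Int.mod l 5 + r - l = -(s : Int) := by omega
  rw [hstop]
  have hlen0 : (PySem.List.slice res (some (PySem.Int.mod l 5)) (some (-(s : Int)))).length = 0 := by
    rw [PySem.List.length_slice, PySem.List.clampIdx_neg_natCast res.length s hs0]
    omega
  exact List.eq_nil_of_length_eq_zero hlen0

-- A returns '' whenever some depth d of its recursion sees a reversed range with a
-- gap of at least 5^(remaining levels) + 4, or an empty-in-place range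
theorem fooChars_rev_deep : ∀ (d k : Nat) (l r : Int), d ≤ k →
    ((5 : Int) ^ (k + 1 - d) + 4 ≤ PySem.Int.floordiv l ((5 : Int) ^ d) - pvChainR r d ∨
     (0 ≤ PySem.Int.floordiv l ((5 : Int) ^ d) - pvChainR r d ∧
      PySem.Int.floordiv l ((5 : Int) ^ d) - pvChainR r d
        ≤ PySem.Int.mod (PySem.Int.floordiv l ((5 : Int) ^ d)) 5)) →
    fooChars (k + 1) l r = [] := by
  intro d
  induction d with
  | zero =>
    intro k l r _ hcond
    rw [pow_zero, fd_one, chainR_zero, Nat.sub_zero] at hcond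
    rcases hcond with hbig | ⟨h0, h1⟩
    · exact fooChars_rev k l r (by omega)
    · exact fooChars_empty k l r h0 h1
  | succ e ih =>
    intro k l r hdk hcond
    obtain ⟨k', hk'⟩ : ∃ k', k = k' + 1 := ⟨k - 1, by omega⟩
    subst hk'
    apply fooChars_inner_nil
    apply ih k' (PySem.Int.floordiv l 5) (PySem.Int.floordiv r 5 + 1) (by omega)
    rw [fd_comp, ← chainR_succ]
    have hexp : k' + 1 - e = k' + 1 + 1 - (e + 1) := by omega
    rw [hexp]
    exact hcond

-- ===== VERDICT (by name: the statement is the Claim_ definition above) =====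
theorem foo_spec : Claim_unchanged_foo := by
  intro n l r _hdom hpre hnd
  obtain ⟨hn0, _hn9000, hcase⟩ := hpre
  unfold foo foo_alt
  rcases hcase with ⟨hn, hrl⟩ | ⟨hn1, d, hdmem, hcond⟩ | ⟨hlr, hr⟩
  · exact absurd ⟨hn, hrl⟩ hnd
  · -- a depth of A's recursion sees an empty/strongly reversed range: both sides are ''
    rw [Finset.mem_range] at hdmem
    obtain ⟨k, hk2⟩ : ∃ k, n.toNat = k + 1 := ⟨n.toNat - 1, by omega⟩
    rw [hk2] at hcond ⊢
    have hrle : r ≤ l := by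
      by_contra hcon
      have hlt := chain_lt l r (by omega) d
      have hpow1 : (1 : Int) ≤ (5 : Int) ^ (k + 1 - d) := one_le_pow₀ (by norm_num)
      rcases hcond with h | h <;> omega
    rw [fooChars_rev_deep d k l r (by omega) hcond, PySem.List.pyRange_one_eq_nil hrle]
    rfl
  · rcases eq_or_lt_of_le hlr with heq | hlt
    · -- empty range: for n = 0 this lies in D_ (excluded); for n ≥ 1 both sides are ''
      subst heq
      have hn1 : n ≠ 0 := fun h => hnd ⟨h, le_rfl⟩
      obtain ⟨k, hk2⟩ : ∃ k, n.toNat = k + 1 := ⟨n.toNat - 1, by omega⟩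
      have hm : 0 ≤ PySem.Int.mod l 5 := PySem.Int.mod_nonneg l (by norm_num)
      rw [hk2, fooChars_empty k l l (by omega) (by omega),
          PySem.List.pyRange_one_eq_nil le_rfl]
      rfl
    · have h := fooChars_eq n.toNat l r hlt (by omega)
      rw [h]
      have hmin : min r ((5 : Int) ^ n.toNat * (PySem.Int.floordiv l ((5 : Int) ^ n.toNat) + 1)) = r := by
        omega
      rw [hmin]

theorem foo_changed : Claim_changed_foo := by unfold Claim_changed_foo; decide

theorem foo_tight : Claim_exact_foo := by
  intro n l r _hdom _hpre hd
  obtain ⟨hn, hrl⟩ := hd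
  subst hn
  unfold foo foo_alt
  rw [PySem.List.pyRange_one_eq_nil hrl]
  show String.ofList (fooChars 0 l r) ≠ String.ofList []
  simp [fooChars]
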